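-- pv_equiv track=rewrite | github.com/FlandreCirno/AzurLaneWikiUtilities | src/azurlane_wiki/core/ship_stats_calculator.py | build_pn_array
-- ===== SOURCE A (Python) =====
-- from typing import List, Dict, Optional, Any
--
-- def build_pn_array(
--     attrs: List[int],
--     attrs_growth: List[int],
--     attrs_growth_extra: List[int],
--     strengthen_values: Optional[List[int]] = None,
--     oil_at_start: int = 0,
--     oil_at_end: int = 0,
--     remould_bonuses: Optional[List[int]] = None
-- ) -> List[int]:
--     """Build a 56-element PN array from ship statistics.
--
--     Args:
--         attrs: Base attributes [durability, cannon, torpedo, ...] (12 values)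
--         attrs_growth: Growth values for level 1-100 (12 values)
--         attrs_growth_extra: Extra growth for level 100+ (12 values)
--         strengthen_values: Strengthening bonuses [cannon, torpedo, AA, air, reload] (5 values)
--         oil_at_start: Base oil consumption
--         oil_at_end: Oil consumption growth
--         remould_bonuses: Retrofit/remould bonuses (13 values)
--
--     Returns:
--         List of 56 values representing the ship's PN array
--     """
--     pn = [0] * 56
--
--     # Fill base stats, growth, and extra growth (indices 0-35)
--     for i in range(12):
--         pn[3 * i] = attrs[i] if i < len(attrs) else 0
--         pn[3 * i + 1] = attrs_growth[i] if i < len(attrs_growth) else 0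
--         pn[3 * i + 2] = attrs_growth_extra[i] if i < len(attrs_growth_extra) else 0
--
--     # Fill strengthen bonuses (indices 36-40)
--     if strengthen_values:
--         for i in range(min(5, len(strengthen_values))):
--             pn[36 + i] = strengthen_values[i]
--
--     # Fill remould bonuses (indices 41-53)
--     if remould_bonuses:
--         for i in range(min(13, len(remould_bonuses))):
--             pn[41 + i] = remould_bonuses[i]
--
--     # Fill oil consumption (indices 54-55)
--     pn[54] = oil_at_start
--     pn[55] = oil_at_end
--
--     return pn
-- ===== SOURCE B (Python) =====
-- def build_pn_array(
--     attrs,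
--     attrs_growth,
--     attrs_growth_extra,
--     strengthen_values=None,
--     oil_at_start=0,
--     oil_at_end=0,
--     remould_bonuses=None,
-- ):
--     # Positional decode: each of the 56 slots is computed directly from its index
--     # instead of staging writes into segments of a buffer.
--     def value_at(j):
--         if j < 36:
--             q, r = divmod(j, 3)
--             src = (attrs, attrs_growth, attrs_growth_extra)[r]
--             return src[q] if q < len(src) else 0
--         if j < 41:
--             sv = strengthen_values or []
--             k = j - 36
--             return sv[k] if k < len(sv) else 0
--         if j < 54:
--             rb = remould_bonuses or []
--             k = j - 41
--             return rb[k] if k < len(rb) else 0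
--         return oil_at_start if j == 54 else oil_at_end
--
--     return [value_at(j) for j in range(56)]
-- ===== Notes on version B (the rewrite author's own statement) =====
-- stated objective: alternative
-- what changed: B computes each of the 56 slots directly from its index with a closed-form position decode (divmod for the interleaved triples, offset subtraction for the strengthen/remould/oil segments) in one map over range(56), instead of A's staged in-place writes into a preallocated [0]*56 buffer.
import Mathlib
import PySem

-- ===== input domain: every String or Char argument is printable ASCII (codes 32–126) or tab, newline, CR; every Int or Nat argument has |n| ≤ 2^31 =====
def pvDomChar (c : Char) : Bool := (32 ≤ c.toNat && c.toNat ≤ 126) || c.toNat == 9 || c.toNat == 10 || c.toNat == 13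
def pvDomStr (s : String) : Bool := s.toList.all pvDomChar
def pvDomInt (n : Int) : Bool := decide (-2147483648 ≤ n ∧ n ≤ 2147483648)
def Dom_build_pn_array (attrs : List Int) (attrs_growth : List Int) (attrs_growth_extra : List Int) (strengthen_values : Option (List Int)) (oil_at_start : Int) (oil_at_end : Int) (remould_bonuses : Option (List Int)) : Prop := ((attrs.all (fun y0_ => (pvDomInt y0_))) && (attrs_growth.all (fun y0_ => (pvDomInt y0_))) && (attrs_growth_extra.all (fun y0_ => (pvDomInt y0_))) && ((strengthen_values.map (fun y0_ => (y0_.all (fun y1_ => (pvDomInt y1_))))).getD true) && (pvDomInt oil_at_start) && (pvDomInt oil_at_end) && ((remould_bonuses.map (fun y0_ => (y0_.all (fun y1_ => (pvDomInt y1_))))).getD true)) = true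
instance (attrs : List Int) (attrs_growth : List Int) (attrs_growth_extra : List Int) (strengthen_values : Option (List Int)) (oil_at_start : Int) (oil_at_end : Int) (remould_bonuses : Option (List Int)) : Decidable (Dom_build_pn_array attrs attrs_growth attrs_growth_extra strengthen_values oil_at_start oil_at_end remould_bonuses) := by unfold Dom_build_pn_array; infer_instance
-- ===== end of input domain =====

-- B computes each of the 56 slots directly from its index (divmod position decode in one map
-- over range(56)) instead of A's staged in-place writes into a preallocated zero buffer
-- (objective: alternative).


-- ===== PORT A =====
def build_pn_array (attrs : List Int) (attrs_growth : List Int) (attrs_growth_extra : List Int) (strengthen_values : Option (List Int)) (oil_at_start : Int) (oil_at_end : Int) (remould_bonuses : Option (List Int)) : List Int :=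
  -- pn = [0] * 56
  let pn : List Int := List.replicate 56 0
  -- for i in range(12): pn[3*i] = ...; pn[3*i+1] = ...; pn[3*i+2] = ...
  let pn := (List.range 12).foldl (fun pn i =>
    let pn := pn.set (3 * i) (if i < attrs.length then attrs.getD i 0 else 0)
    let pn := pn.set (3 * i + 1) (if i < attrs_growth.length then attrs_growth.getD i 0 else 0)
    pn.set (3 * i + 2) (if i < attrs_growth_extra.length then attrs_growth_extra.getD i 0 else 0)) pn
  -- if strengthen_values: for i in range(min(5, len(strengthen_values))): pn[36+i] = strengthen_values[i]
  let pn := match strengthen_values with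
    | none => pn
    | some sv =>
      if sv.isEmpty then pn
      else (List.range (min 5 sv.length)).foldl (fun pn i => pn.set (36 + i) (sv.getD i 0)) pn
  -- if remould_bonuses: for i in range(min(13, len(remould_bonuses))): pn[41+i] = remould_bonuses[i]
  let pn := match remould_bonuses with
    | none => pn
    | some rb =>
      if rb.isEmpty then pn
      else (List.range (min 13 rb.length)).foldl (fun pn i => pn.set (41 + i) (rb.getD i 0)) pn
  -- pn[54] = oil_at_start; pn[55] = oil_at_end
  let pn := pn.set 54 oil_at_start
  pn.set 55 oil_at_end

-- ===== PORT B =====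
-- value_at(j): the slot at index j, decoded from the position (j is 0..55, a nonnegative
-- Python int, so Nat division/mod agree exactly with Python's divmod here).
def pvVal (attrs : List Int) (attrs_growth : List Int) (attrs_growth_extra : List Int) (strengthen_values : Option (List Int)) (oil_at_start : Int) (oil_at_end : Int) (remould_bonuses : Option (List Int)) (j : Nat) : Int :=
  if j < 36 then
    let q := j / 3
    let r := j % 3
    -- src = (attrs, attrs_growth, attrs_growth_extra)[r]
    let src := if r = 0 then attrs else if r = 1 then attrs_growth else attrs_growth_extra
    if q < src.length then src.getD q 0 else 0
  else if j < 41 then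
    -- sv = strengthen_values or []  (the only falsy list is [], so getD [] is exact)
    let sv := strengthen_values.getD []
    let k := j - 36
    if k < sv.length then sv.getD k 0 else 0
  else if j < 54 then
    let rb := remould_bonuses.getD []
    let k := j - 41
    if k < rb.length then rb.getD k 0 else 0
  else if j = 54 then oil_at_start else oil_at_end

def build_pn_array_alt (attrs : List Int) (attrs_growth : List Int) (attrs_growth_extra : List Int) (strengthen_values : Option (List Int)) (oil_at_start : Int) (oil_at_end : Int) (remould_bonuses : Option (List Int)) : List Int :=
  (List.range 56).map (pvVal attrs attrs_growth attrs_growth_extra strengthen_values oil_at_start oil_at_end remould_bonuses)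

-- ===== PRECONDITION & SPEC =====
def Spec_build_pn_array (attrs : List Int) (attrs_growth : List Int) (attrs_growth_extra : List Int) (strengthen_values : Option (List Int)) (oil_at_start : Int) (oil_at_end : Int) (remould_bonuses : Option (List Int)) (out : List Int) : Prop := out = build_pn_array_alt attrs attrs_growth attrs_growth_extra strengthen_values oil_at_start oil_at_end remould_bonuses
instance (attrs : List Int) (attrs_growth : List Int) (attrs_growth_extra : List Int) (strengthen_values : Option (List Int)) (oil_at_start : Int) (oil_at_end : Int) (remould_bonuses : Option (List Int)) (out : List Int) : Decidable (Spec_build_pn_array attrs attrs_growth attrs_growth_extra strengthen_values oil_at_start oil_at_end remould_bonuses out) := by unfold Spec_build_pn_array; infer_instance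

-- ===== CLAIM (what is proved, stated in full; the proofs are below) =====
def Claim_equal_build_pn_array : Prop := ∀ (attrs : List Int) (attrs_growth : List Int) (attrs_growth_extra : List Int) (strengthen_values : Option (List Int)) (oil_at_start : Int) (oil_at_end : Int) (remould_bonuses : Option (List Int)), Dom_build_pn_array attrs attrs_growth attrs_growth_extra strengthen_values oil_at_start oil_at_end remould_bonuses → Spec_build_pn_array attrs attrs_growth attrs_growth_extra strengthen_values oil_at_start oil_at_end remould_bonuses (build_pn_array attrs attrs_growth attrs_growth_extra strengthen_values oil_at_start oil_at_end remould_bonuses)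

-- ===== LEMMAS AND PROOFS =====

-- proof-only helper: xs[:n] zero-filled to length n (a segment of A's buffer)
def pvPad (xs : List Int) (n : Nat) : List Int :=
  let head := xs.take n
  head ++ List.replicate (n - head.length) 0

-- setting a slot just past a known-length prefix
lemma setk0 {k : Nat} (l r : List Int) (a : Int) (hl : l.length = k) :
    (l ++ r).set k a = l ++ r.set 0 a := by
  subst hl
  rw [List.set_append_right _ _ le_rfl]
  simp

-- three consecutive writes just past a known-length prefix
lemma set3 {k : Nat} (l : List Int) (x y z a b c : Int) (t : List Int) (hl : l.length = k) :
    (((l ++ x :: y :: z :: t).set k a).set (k + 1) b).set (k + 2) c = l ++ a :: b :: c :: t := by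
  subst hl
  rw [List.set_append_right _ _ le_rfl, List.set_append_right _ _ (by omega),
      List.set_append_right _ _ (by omega)]
  simp

-- (range m).map (fun i => l.getD i 0) = l.take m  when m <= l.length
lemma map_range_getD (l : List Int) (m : Nat) (hm : m ≤ l.length) :
    (List.range m).map (fun i => l.getD i 0) = l.take m := by
  apply List.ext_getElem
  · simp [hm]
  · intro i h1 h2
    simp at h1 h2 ⊢
    simp [List.getElem?_eq_getElem (show i < l.length by omega)]

-- length of an interleaved flatMap of 3-element blocks
lemma flatMap3_length (F : Nat → List Int) (hF : ∀ i, (F i).length = 3) (n : Nat) :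
    ((List.range n).flatMap F).length = 3 * n := by
  induction n with
  | zero => simp
  | succ n ih => rw [List.range_succ, List.flatMap_append]; simp [ih, hF]; omega

-- generic single-index fill loop: writes v 0 .. v (m-1) at offsets k .. k+m-1
lemma fillk (v : Nat → Int) (k : Nat) :
    ∀ (m : Nat) (pn : List Int), k + m ≤ pn.length →
    (List.range m).foldl (fun pn i => pn.set (k + i) (v i)) pn
      = pn.take k ++ (List.range m).map v ++ pn.drop (k + m) := by
  intro m
  induction m with
  | zero => intro pn hlen; simp
  | succ m ih =>
    intro pn hlen
    rw [List.range_succ, List.foldl_append, ih pn (by omega)]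
    simp only [List.foldl_cons, List.foldl_nil]
    have htk : (pn.take k).length = k := by simp; omega
    have hmp : ((List.range m).map v).length = m := by simp
    rcases hd : pn.drop (k + m) with _ | ⟨x, t⟩
    · exfalso; have := congrArg List.length hd; simp at this; omega
    · have hdrop : pn.drop (k + (m + 1)) = t := by
        have e : pn.drop (k + (m + 1)) = (pn.drop (k + m)).drop 1 := by
          rw [List.drop_drop]; ring_nf
        rw [e, hd]; simp
      rw [setk0 _ _ _ (by rw [List.length_append, htk, hmp]), List.set_cons_zero,
          List.map_append, hdrop]
      simp

-- the triple-write loop of port A fills the first 3n slots with interleaved values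
lemma fill3 (f g h : Nat → Int) :
    ∀ (n : Nat) (pn : List Int), 3 * n ≤ pn.length →
    (List.range n).foldl
        (fun pn i => ((pn.set (3 * i) (f i)).set (3 * i + 1) (g i)).set (3 * i + 2) (h i)) pn
      = (List.range n).flatMap (fun i => [f i, g i, h i]) ++ pn.drop (3 * n) := by
  intro n
  induction n with
  | zero => intro pn hlen; simp
  | succ n ih =>
    intro pn hlen
    rw [List.range_succ, List.foldl_append, ih pn (by omega)]
    simp only [List.foldl_cons, List.foldl_nil]
    have hB : ((List.range n).flatMap (fun i => [f i, g i, h i])).length = 3 * n :=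
      flatMap3_length _ (fun _ => rfl) n
    rcases hd : pn.drop (3 * n) with _ | ⟨x, t⟩
    · exfalso; have := congrArg List.length hd; simp at this; omega
    rcases t with _ | ⟨y, t⟩
    · exfalso; have := congrArg List.length hd; simp at this; omega
    rcases t with _ | ⟨z, t⟩
    · exfalso; have := congrArg List.length hd; simp at this; omega
    have hdrop : pn.drop (3 * (n + 1)) = t := by
      have e : pn.drop (3 * (n + 1)) = (pn.drop (3 * n)).drop 3 := by
        rw [List.drop_drop]; ring_nf
      rw [e, hd]; simp
    rw [set3 _ x y z _ _ _ t hB, List.flatMap_append, hdrop]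
    simp

-- a capped fill loop over a zero-filled tail equals a pvPad segment
lemma seg (v : List Int) (cap z k : Nat) (pre : List Int)
    (hk : pre.length = k) (hz : cap ≤ z) :
    (List.range (min cap v.length)).foldl (fun pn i => pn.set (k + i) (v.getD i 0))
        (pre ++ List.replicate z 0)
      = pre ++ pvPad v cap ++ List.replicate (z - cap) 0 := by
  have hm : min cap v.length ≤ cap := Nat.min_le_left _ _
  rw [fillk _ k (min cap v.length) _ (by simp [hk]; omega)]
  rw [map_range_getD v _ (Nat.min_le_right _ _)]
  have h1 : (pre ++ List.replicate z (0:Int)).take k = pre := by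
    rw [← hk, List.take_left]
  have h2 : (pre ++ List.replicate z (0:Int)).drop (k + min cap v.length)
      = List.replicate (z - min cap v.length) 0 := by
    rw [List.drop_append, List.drop_replicate]
    simp [hk]
  rw [h1, h2]
  have h3 : v.take (min cap v.length) = v.take cap := by
    by_cases hle : v.length ≤ cap
    · rw [Nat.min_eq_right hle, List.take_of_length_le hle, List.take_length]
    · rw [Nat.min_eq_left (by omega)]
  have h4 : (List.replicate (z - min cap v.length) (0:Int))
      = List.replicate (cap - (v.take cap).length) 0 ++ List.replicate (z - cap) 0 := by
    rw [← List.replicate_add]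
    congr 1
    simp
    omega
  rw [h3, h4, pvPad]
  simp

-- pvPad as a map over range
lemma pvPad_eq_map (xs : List Int) (n : Nat) :
    pvPad xs n = (List.range n).map (fun i => if i < xs.length then xs.getD i 0 else 0) := by
  apply List.ext_getElem
  · simp [pvPad]
  · intro i h1 h2
    simp [pvPad] at h1 ⊢
    by_cases hx : i < xs.length
    · have hmin : i < (xs.take n).length := by simp; omega
      rw [List.getElem_append_left hmin]
      simp [hx]
    · rw [List.getElem_append_right (by simp; omega)]
      simp [hx]

-- pvPad of the empty list is all zeros
lemma pvPad_nil (n : Nat) : pvPad [] n = List.replicate n 0 := by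
  simp [pvPad]

-- A's result, characterised as a concatenation of four segments
lemma A_eq_concat (attrs attrs_growth attrs_growth_extra : List Int)
    (strengthen_values : Option (List Int)) (oil_at_start oil_at_end : Int)
    (remould_bonuses : Option (List Int)) :
    build_pn_array attrs attrs_growth attrs_growth_extra strengthen_values oil_at_start oil_at_end remould_bonuses
      = (List.range 12).flatMap (fun i =>
          [if i < attrs.length then attrs.getD i 0 else 0,
           if i < attrs_growth.length then attrs_growth.getD i 0 else 0,
           if i < attrs_growth_extra.length then attrs_growth_extra.getD i 0 else 0])
        ++ pvPad (strengthen_values.getD []) 5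
        ++ pvPad (remould_bonuses.getD []) 13
        ++ [oil_at_start, oil_at_end] := by
  unfold build_pn_array
  set F := (List.range 12).flatMap (fun i =>
      [if i < attrs.length then attrs.getD i 0 else 0,
       if i < attrs_growth.length then attrs_growth.getD i 0 else 0,
       if i < attrs_growth_extra.length then attrs_growth_extra.getD i 0 else 0]) with hFdef
  have hF : F.length = 36 := by
    rw [hFdef]; exact flatMap3_length _ (fun i => rfl) 12
  have step1 : (List.range 12).foldl
      (fun pn i => ((pn.set (3 * i) (if i < attrs.length then attrs.getD i 0 else 0)).set (3 * i + 1)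
          (if i < attrs_growth.length then attrs_growth.getD i 0 else 0)).set (3 * i + 2)
          (if i < attrs_growth_extra.length then attrs_growth_extra.getD i 0 else 0))
      (List.replicate 56 0)
      = F ++ List.replicate 20 0 := by
    rw [fill3 _ _ _ 12 _ (by simp)]
    rw [List.drop_replicate]
  simp only [step1]
  have hsv : ∀ pn1, pn1 = F ++ List.replicate 20 0 →
      (match strengthen_values with
        | none => pn1
        | some sv =>
          if sv.isEmpty then pn1
          else (List.range (min 5 sv.length)).foldl (fun pn i => pn.set (36 + i) (sv.getD i 0)) pn1)
      = F ++ pvPad (strengthen_values.getD []) 5 ++ List.replicate 15 0 := by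
    intro pn1 hpn1
    match strengthen_values with
    | none => simp [hpn1, pvPad_nil]
    | some sv =>
      by_cases hs : sv.isEmpty
      · have : sv = [] := List.isEmpty_iff.mp hs
        simp [hpn1, this, pvPad_nil]
      · simp only [Option.getD_some]
        rw [if_neg hs, hpn1, seg sv 5 20 36 F hF (by omega)]
  rw [hsv _ rfl]
  have hpre2 : (F ++ pvPad (strengthen_values.getD []) 5).length = 41 := by
    simp [hF, pvPad]
  have hrb : (match remould_bonuses with
        | none => F ++ pvPad (strengthen_values.getD []) 5 ++ List.replicate 15 0
        | some rb =>
          if rb.isEmpty then F ++ pvPad (strengthen_values.getD []) 5 ++ List.replicate 15 0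
          else (List.range (min 13 rb.length)).foldl (fun pn i => pn.set (41 + i) (rb.getD i 0))
              (F ++ pvPad (strengthen_values.getD []) 5 ++ List.replicate 15 0))
      = F ++ pvPad (strengthen_values.getD []) 5 ++ pvPad (remould_bonuses.getD []) 13
          ++ List.replicate 2 0 := by
    match remould_bonuses with
    | none => simp [pvPad_nil, List.append_assoc]
    | some rb =>
      by_cases hs : rb.isEmpty
      · have : rb = [] := List.isEmpty_iff.mp hs
        simp [this, pvPad_nil, List.append_assoc]
      · simp only [Option.getD_some]
        rw [if_neg hs, seg rb 13 15 41 (F ++ pvPad (strengthen_values.getD []) 5) hpre2 (by omega)]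
  rw [hrb]
  have hpre3 : (F ++ pvPad (strengthen_values.getD []) 5 ++ pvPad (remould_bonuses.getD []) 13).length = 54 := by
    simp [hF, pvPad]; omega
  rw [show (List.replicate 2 (0:Int)) = [0, 0] from rfl,
      setk0 _ _ _ hpre3, List.set_cons_zero,
      List.set_append_right _ _ (by rw [hpre3]; omega)]
  rw [hpre3]
  norm_num

-- interleaved 3-blocks, re-indexed as a single map by divmod
lemma flatMap3_eq_map (f g h : Nat → Int) (n : Nat) :
    (List.range n).flatMap (fun i => [f i, g i, h i])
      = (List.range (3 * n)).map (fun j =>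
          if j % 3 = 0 then f (j / 3) else if j % 3 = 1 then g (j / 3) else h (j / 3)) := by
  induction n with
  | zero => simp
  | succ n ih =>
    rw [List.range_succ, List.flatMap_append, ih]
    have h3 : 3 * (n + 1) = (3 * n) + 1 + 1 + 1 := by ring
    rw [h3, List.range_succ, List.range_succ, List.range_succ]
    have e0 : (3 * n) % 3 = 0 ∧ (3 * n) / 3 = n := by omega
    have e1 : (3 * n + 1) % 3 = 1 ∧ (3 * n + 1) / 3 = n := by omega
    have e2 : (3 * n + 1 + 1) % 3 = 2 ∧ (3 * n + 1 + 1) / 3 = n := by omega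
    simp [e0.1, e0.2, e1.1, e1.2, e2.1, e2.2]

-- the concrete split of range 56 used to compare the two shapes
lemma range56_split :
    List.range 56
      = List.range 36 ++ ((List.range 5).map (fun k => 36 + k))
        ++ ((List.range 13).map (fun k => 41 + k)) ++ [54, 55] := by
  decide

-- ===== VERDICT (by name: the statement is the Claim_ definition above) =====
theorem build_pn_array_spec : Claim_equal_build_pn_array := by
  intro attrs attrs_growth attrs_growth_extra strengthen_values oil_at_start oil_at_end remould_bonuses _
  unfold Spec_build_pn_array build_pn_array_alt
  set val := pvVal attrs attrs_growth attrs_growth_extra strengthen_values oil_at_start oil_at_end remould_bonuses with hval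
  have hT : (List.range 36).map val
      = (List.range 12).flatMap (fun i =>
          [if i < attrs.length then attrs.getD i 0 else 0,
           if i < attrs_growth.length then attrs_growth.getD i 0 else 0,
           if i < attrs_growth_extra.length then attrs_growth_extra.getD i 0 else 0]) := by
    rw [flatMap3_eq_map, show 3 * 12 = 36 from rfl]
    apply List.map_congr_left
    intro j hj
    rw [List.mem_range] at hj
    rw [hval]
    unfold pvVal
    rw [if_pos hj]
    have h3 : j % 3 = 0 ∨ j % 3 = 1 ∨ j % 3 = 2 := by omega
    rcases h3 with h | h | h <;> simp [h]
  have hS : (List.range 5).map (fun k => val (36 + k)) = pvPad (strengthen_values.getD []) 5 := by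
    rw [pvPad_eq_map]
    apply List.map_congr_left
    intro k hk
    rw [List.mem_range] at hk
    rw [hval]
    unfold pvVal
    rw [if_neg (by omega), if_pos (by omega)]
    have e : 36 + k - 36 = k := by omega
    simp [e]
  have hR : (List.range 13).map (fun k => val (41 + k)) = pvPad (remould_bonuses.getD []) 13 := by
    rw [pvPad_eq_map]
    apply List.map_congr_left
    intro k hk
    rw [List.mem_range] at hk
    rw [hval]
    unfold pvVal
    rw [if_neg (by omega), if_neg (by omega), if_pos (by omega)]
    have e : 41 + k - 41 = k := by omega
    simp [e]
  have h54 : val 54 = oil_at_start := by rw [hval]; unfold pvVal; norm_num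
  have h55 : val 55 = oil_at_end := by rw [hval]; unfold pvVal; norm_num
  rw [A_eq_concat, range56_split]
  simp only [List.map_append, List.map_map, Function.comp_def, List.map_cons, List.map_nil]
  rw [hT, hS, hR, h54, h55]
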